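-- pv_equiv track=rewrite | github.com/kamilGie/ASRT-WDI | Zestaw_3:_Tablice_o_większej_liczbie_wymiarów/097/Rozwiązania/main.py | Zadanie_97
-- ===== SOURCE A (Python) =====
-- from math import inf
--
-- def Zadanie_97(T1):
--     """Będę usuwał najmniejszy element z każdej tablicy, aż usunę wszystkie elementy, i sprawdzał powtarzalność tych najmniejszych elementów."""
--     N = len(T1)
--     T2 = []
--
--     while True:
--         # Szukam najmniejszego elementu na 0 indeksie kazdej tablicy jesli istenieje
--         smallest = min((row[0] for row in T1 if row), default=inf)
--
--         # jesli najmniejszy nie istenieje to znaczy ze przeszedlem wszystkie tablice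
--         if smallest == inf:
--             break
--
--         # Usuwam najmniejsze elementy i licze ich wystąpienia
--         smallest_cnt = 0
--         for row in T1:
--             if row and row[0] == smallest:
--                 row.pop(0)
--                 smallest_cnt += 1
--
--         # Dodaje singletony do wyniku
--         if smallest_cnt == 1:
--             T2.append(smallest)
--
--     # Uzupełniam brakujące elementy zerami
--     T2.extend([0] * (N * N - len(T2)))
--
--     return T2
-- ===== SOURCE B (Python) =====
-- # B: merge of rows via a sorted worklist of (head, iterator) entries kept in ascending
-- # order with binary-search insertion; each step pops the equal-value prefix instead of
-- # rescanning and pop(0)-shifting all rows as A does.  Unlike A, B does not mutate T1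
-- # (A empties every row in place); the return value is identical.
-- def Zadanie_97(T1):
--     N = len(T1)
--     active = []  # kept sorted ascending by value
--     for row in T1:
--         it = iter(row)
--         v = next(it, None)
--         if v is not None:
--             _pv_insert(active, (v, it))
--     T2 = []
--     while active:
--         m = active[0][0]
--         k = 1
--         while k < len(active) and active[k][0] == m:
--             k += 1
--         popped = active[:k]
--         del active[:k]
--         if k == 1:
--             T2.append(m)
--         for _, it in popped:
--             v = next(it, None)
--             if v is not None:
--                 _pv_insert(active, (v, it))
--     T2.extend([0] * (N * N - len(T2)))
--     return T2
--
-- def _pv_insert(active, entry):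
--     v = entry[0]
--     lo, hi = 0, len(active)
--     while lo < hi:
--         mid = (lo + hi) // 2
--         if active[mid][0] <= v:
--             lo = mid + 1
--         else:
--             hi = mid
--     active.insert(lo, entry)
-- ===== Notes on version B (the rewrite author's own statement) =====
-- stated objective: alternative
-- what changed: A repeatedly rescans every row for the minimum head and pop(0)-shifts the rows; B builds a sorted worklist of (head, row-iterator) entries maintained by binary-search insertion and each step pops only the equal-value prefix and reinserts the successors, never touching the other rows (B also does not mutate T1, while A empties it in place).
import Mathlib
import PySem

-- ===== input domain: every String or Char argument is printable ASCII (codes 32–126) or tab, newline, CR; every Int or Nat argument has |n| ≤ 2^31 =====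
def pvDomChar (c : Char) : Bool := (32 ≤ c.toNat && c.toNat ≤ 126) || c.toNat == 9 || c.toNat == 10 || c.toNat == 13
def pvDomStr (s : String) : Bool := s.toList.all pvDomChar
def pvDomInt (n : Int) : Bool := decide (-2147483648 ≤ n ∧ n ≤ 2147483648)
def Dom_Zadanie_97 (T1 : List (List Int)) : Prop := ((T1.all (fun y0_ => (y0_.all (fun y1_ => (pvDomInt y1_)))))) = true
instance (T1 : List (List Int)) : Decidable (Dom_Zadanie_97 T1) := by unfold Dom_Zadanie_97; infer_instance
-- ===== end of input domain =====

-- B replaces A's per-step rescan of all rows (and pop(0) shifting) by a sorted worklist of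
-- (head, rest-of-row) entries, maintained by binary-search insertion, from which the equal-value
-- prefix is popped each step; the equivalence proved is about the RETURN value only (A empties
-- the rows of T1 in place, B does not mutate T1).

-- ===== PORT A =====
-- heads of the nonempty rows, as the generator '(row[0] for row in T1 if row)' produces them
def pvHeads (rows : List (List Int)) : List Int := rows.filterMap List.head?

-- 'if row and row[0] == smallest: row.pop(0)' applied to one row
def pvPop (m : Int) (r : List Int) : List Int :=
  match r with
  | [] => []
  | h :: t => if h = m then t else h :: t

def pvSumLen (rows : List (List Int)) : Nat := (rows.map List.length).sum

-- termination of A's while-loop: when a smallest head exists, some row gets shorter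
lemma pvPop_len_le (m : Int) (r : List Int) : (pvPop m r).length ≤ r.length := by
  cases r with
  | nil => simp [pvPop]
  | cons a t => by_cases ha : a = m <;> simp [pvPop, ha]

lemma pvSumLen_map_pop_le (m : Int) (rows : List (List Int)) :
    pvSumLen (rows.map (pvPop m)) ≤ pvSumLen rows := by
  simp only [pvSumLen, List.map_map]
  apply List.sum_le_sum
  intro x hx
  simpa using pvPop_len_le m x

lemma pvSumLen_map_pop_lt (m : Int) (rows : List (List Int))
    (h : m ∈ pvHeads rows) : pvSumLen (rows.map (pvPop m)) < pvSumLen rows := by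
  induction rows with
  | nil => simp [pvHeads] at h
  | cons r rs ih =>
      cases r with
      | nil =>
          have h' : m ∈ pvHeads rs := by simpa [pvHeads] using h
          have := ih h'
          simp only [pvSumLen, List.map_cons, List.sum_cons, List.map_map, pvPop] at this ⊢
          omega
      | cons a t =>
          by_cases ha : a = m
          · have hle := pvSumLen_map_pop_le m rs
            subst ha
            simp only [pvSumLen, List.map_cons, List.sum_cons, List.length_cons, List.map_map] at hle ⊢
            simp [pvPop]
            omega
          · have h' : m ∈ pvHeads rs := by
              have h2 : m = a ∨ m ∈ pvHeads rs := by simpa [pvHeads] using h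
              rcases h2 with h2 | h2
              · exact absurd h2.symm ha
              · exact h2
            have := ih h'
            simp only [pvSumLen, List.map_cons, List.sum_cons, List.map_map] at this ⊢
            simp only [pvPop, if_neg ha]
            omega

-- A's while-loop: rows = current state of T1, acc = T2
def pvLoopA (rows : List (List Int)) (acc : List Int) : List Int :=
  match hm : PySem.List.min? (pvHeads rows) (fun x => x) with
  | none => acc
  | some m =>
      pvLoopA (rows.map (pvPop m))
        (if (pvHeads rows).count m = 1 then acc ++ [m] else acc)
termination_by pvSumLen rows
decreasing_by simpa using pvSumLen_map_pop_lt m rows (PySem.List.min?_mem hm)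

def Zadanie_97 (T1 : List (List Int)) : List Int :=
  let T2 := pvLoopA T1 []
  T2 ++ List.replicate ((T1.length * T1.length : Int) - (T2.length : Int)).toNat 0

-- ===== PORT B =====
-- _pv_insert's binary search: the Python while-loop on (lo, hi), with hi - lo as fuel
-- (each iteration shrinks hi - lo, so the fuel is never exhausted)
def pvBisectGo (active : List (Int × List Int)) (v : Int) : Nat → Nat → Nat → Nat
  | 0, lo, _ => lo
  | k + 1, lo, hi =>
      if lo < hi then
        if (active.getD ((lo + hi) / 2) (0, [])).1 ≤ v then
          pvBisectGo active v k ((lo + hi) / 2 + 1) hi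
        else pvBisectGo active v k lo ((lo + hi) / 2)
      else lo

def pvBisect (active : List (Int × List Int)) (v : Int) (lo hi : Nat) : Nat :=
  pvBisectGo active v (hi - lo) lo hi

-- _pv_insert: binary-search insertion keeping 'active' sorted ascending by the head value
def pvInsertB (active : List (Int × List Int)) (e : Int × List Int) : List (Int × List Int) :=
  active.insertIdx (pvBisect active e.1 0 active.length) e

lemma pvBisectGo_between (active : List (Int × List Int)) (v : Int) :
    ∀ (k lo hi : Nat), lo ≤ hi →
      lo ≤ pvBisectGo active v k lo hi ∧ pvBisectGo active v k lo hi ≤ hi := by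
  intro k
  induction k with
  | zero =>
      intro lo hi hlh
      simp [pvBisectGo]
      omega
  | succ k ih =>
      intro lo hi hlh
      rw [pvBisectGo]
      by_cases h : lo < hi
      · rw [if_pos h]
        by_cases h2 : (active.getD ((lo + hi) / 2) (0, [])).1 ≤ v
        · rw [if_pos h2]
          have := ih ((lo + hi) / 2 + 1) hi (by omega)
          omega
        · rw [if_neg h2]
          have := ih lo ((lo + hi) / 2) (by omega)
          omega
      · rw [if_neg h]
        omega

lemma pvBisect_between (active : List (Int × List Int)) (v : Int) (lo hi : Nat)
    (hlh : lo ≤ hi) :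
    lo ≤ pvBisect active v lo hi ∧ pvBisect active v lo hi ≤ hi :=
  pvBisectGo_between active v (hi - lo) lo hi hlh

lemma pvInsertB_perm (a : List (Int × List Int)) (e : Int × List Int) :
    (pvInsertB a e).Perm (e :: a) :=
  List.perm_insertIdx e a
    (pvBisect_between a e.1 0 a.length (by omega)).2

-- 'v = next(it, None); if v is not None: _pv_insert(active, (v, it))'
def pvAdd (a : List (Int × List Int)) (r : List Int) : List (Int × List Int) :=
  match r with
  | [] => a
  | v :: t => pvInsertB a (v, t)

def pvMeasB (active : List (Int × List Int)) : Nat :=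
  (active.map (fun e => e.2.length + 1)).sum

lemma pvMeasB_insert (a : List (Int × List Int)) (e : Int × List Int) :
    pvMeasB (pvInsertB a e) = e.2.length + 1 + pvMeasB a := by
  have h := ((pvInsertB_perm a e).map (fun x => x.2.length + 1)).sum_eq
  simpa [pvMeasB] using h

lemma pvMeasB_add_le (a : List (Int × List Int)) (r : List Int) :
    pvMeasB (pvAdd a r) ≤ r.length + pvMeasB a := by
  cases r with
  | nil => simp [pvAdd]
  | cons v t => simp [pvAdd, pvMeasB_insert]

lemma pvMeasB_foldl_le (l : List (Int × List Int)) (a : List (Int × List Int)) :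
    pvMeasB (l.foldl (fun a x => pvAdd a x.2) a) ≤ (l.map (fun x => x.2.length)).sum + pvMeasB a := by
  induction l generalizing a with
  | nil => simp
  | cons x rest ih =>
      simp only [List.foldl_cons, List.map_cons, List.sum_cons]
      calc pvMeasB (rest.foldl (fun a x => pvAdd a x.2) (pvAdd a x.2))
          ≤ (rest.map (fun x => x.2.length)).sum + pvMeasB (pvAdd a x.2) := ih _
        _ ≤ (rest.map (fun x => x.2.length)).sum + (x.2.length + pvMeasB a) := by
              have := pvMeasB_add_le a x.2; omega
        _ = x.2.length + (rest.map (fun x => x.2.length)).sum + pvMeasB a := by omega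

lemma pvMeasB_eq (l : List (Int × List Int)) :
    pvMeasB l = (l.map (fun x => x.2.length)).sum + l.length := by
  induction l with
  | nil => simp [pvMeasB]
  | cons x rest ih => simp [pvMeasB, List.map_cons] at *; omega

lemma pvMeasB_append (l₁ l₂ : List (Int × List Int)) :
    pvMeasB (l₁ ++ l₂) = pvMeasB l₁ + pvMeasB l₂ := by
  simp [pvMeasB]

lemma pvLoopB_dec (e : Int × List Int) (rest : List (Int × List Int)) :
    pvMeasB ((e :: rest.takeWhile (fun x => x.1 == e.1)).foldl (fun a x => pvAdd a x.2)
      (rest.dropWhile (fun x => x.1 == e.1))) < pvMeasB (e :: rest) := by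
  have hsplit : rest = rest.takeWhile (fun x => x.1 == e.1) ++ rest.dropWhile (fun x => x.1 == e.1) :=
    (List.takeWhile_append_dropWhile).symm
  have h1 := pvMeasB_foldl_le (e :: rest.takeWhile (fun x => x.1 == e.1))
    (rest.dropWhile (fun x => x.1 == e.1))
  have h2 : pvMeasB (e :: rest) =
      pvMeasB [e] + pvMeasB (rest.takeWhile (fun x => x.1 == e.1)) +
        pvMeasB (rest.dropWhile (fun x => x.1 == e.1)) := by
    conv_lhs => rw [show e :: rest = [e] ++ rest from rfl, hsplit]
    rw [← List.append_assoc, pvMeasB_append, pvMeasB_append]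
  have h3 := pvMeasB_eq (rest.takeWhile (fun x => x.1 == e.1))
  simp only [List.map_cons, List.sum_cons, pvMeasB] at h1 h2 h3 ⊢
  omega

-- B's while-loop over the sorted worklist
def pvLoopB (active : List (Int × List Int)) (acc : List Int) : List Int :=
  match active with
  | [] => acc
  | e :: rest =>
      let popped := e :: rest.takeWhile (fun x => x.1 == e.1)
      let rest' := rest.dropWhile (fun x => x.1 == e.1)
      pvLoopB (popped.foldl (fun a x => pvAdd a x.2) rest')
        (if popped.length = 1 then acc ++ [e.1] else acc)
termination_by pvMeasB active
decreasing_by exact pvLoopB_dec e rest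

def Zadanie_97_alt (T1 : List (List Int)) : List Int :=
  let T2 := pvLoopB (T1.foldl pvAdd []) []
  T2 ++ List.replicate ((T1.length * T1.length : Int) - (T2.length : Int)).toNat 0

-- ===== PRECONDITION & SPEC =====
def Spec_Zadanie_97 (T1 : List (List Int)) (out : List Int) : Prop := out = Zadanie_97_alt T1
instance (T1 : List (List Int)) (out : List Int) : Decidable (Spec_Zadanie_97 T1 out) := by unfold Spec_Zadanie_97; infer_instance

-- ===== CLAIM (what is proved, stated in full; the proofs are below) =====
def Claim_equal_Zadanie_97 : Prop := ∀ (T1 : List (List Int)), Dom_Zadanie_97 T1 → Spec_Zadanie_97 T1 (Zadanie_97 T1)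

-- ===== LEMMAS AND PROOFS =====

-- the row represented by a worklist entry
def pvG (e : Int × List Int) : List Int := e.1 :: e.2

def pvNE (r : List Int) : Bool := !r.isEmpty

-- the heads of the rows are the heads of the nonempty rows
lemma pvHeads_eq (rows : List (List Int)) :
    pvHeads rows = (rows.filter pvNE).map (fun r => r.headD 0) := by
  induction rows with
  | nil => rfl
  | cons r rs ih =>
      cases r <;> simp [pvHeads, pvNE, List.filterMap_cons, List.filter_cons] at * <;> simpa using ih

lemma pvMin?_eq (xs : List Int) (m : Int) (hm : m ∈ xs) (hmin : ∀ y ∈ xs, m ≤ y) :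
    PySem.List.min? xs (fun x => x) = some m := by
  have hne : xs ≠ [] := by rintro rfl; simp at hm
  obtain ⟨m', hm'⟩ : ∃ m', PySem.List.min? xs (fun x => x) = some m' := by
    cases h : PySem.List.min? xs (fun x => x) with
    | none => exact absurd ((PySem.List.min?_eq_none_iff xs (fun x => x)).mp h) hne
    | some v => exact ⟨v, rfl⟩
  have h1 : m' ∈ xs := PySem.List.min?_mem hm'
  have h2 : (fun x => x) m' ≤ (fun x => x) m := PySem.List.min?_isMin hm' m hm
  have h3 : m ≤ m' := hmin m' h1
  rw [hm']
  exact congrArg some (le_antisymm (by simpa using h2) h3)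

-- the binary search finds the boundary between the entries ≤ v and those > v
lemma pvBisectGo_spec (active : List (Int × List Int)) (v : Int)
    (hp : active.Pairwise (fun p q => p.1 ≤ q.1)) :
    ∀ (k lo hi : Nat), hi - lo ≤ k → lo ≤ hi → hi ≤ active.length →
      (∀ j (hj : j < active.length), j < lo → (active[j]).1 ≤ v) →
      (∀ j (hj : j < active.length), hi ≤ j → v < (active[j]).1) →
      (∀ j (hj : j < active.length), j < pvBisectGo active v k lo hi → (active[j]).1 ≤ v) ∧
        (∀ j (hj : j < active.length), pvBisectGo active v k lo hi ≤ j → v < (active[j]).1) := by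
  rw [List.pairwise_iff_getElem] at hp
  intro k
  induction k with
  | zero =>
      intro lo hi hk hlh hhle hlo hhi
      rw [pvBisectGo]
      exact ⟨fun j hj hjlo => hlo j hj hjlo, fun j hj hjlo => hhi j hj (by omega)⟩
  | succ k ih =>
      intro lo hi hk hlh hhle hlo hhi
      rw [pvBisectGo]
      by_cases h : lo < hi
      · rw [if_pos h]
        have hmid : (lo + hi) / 2 < active.length := by omega
        rw [List.getD_eq_getElem active (0, ([] : List Int)) hmid]
        by_cases h2 : (active[(lo + hi) / 2]).1 ≤ v
        · rw [if_pos h2]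
          refine ih ((lo + hi) / 2 + 1) hi (by omega) (by omega) hhle ?_ hhi
          intro j hj hjlt
          rcases Nat.lt_or_ge j ((lo + hi) / 2) with hj2 | hj2
          · exact le_trans (hp j ((lo + hi) / 2) hj hmid hj2) h2
          · have hje : j = (lo + hi) / 2 := by omega
            subst hje
            exact h2
        · rw [if_neg h2]
          refine ih lo ((lo + hi) / 2) (by omega) (by omega) (by omega) hlo ?_
          intro j hj hjge
          have hv : v < (active[(lo + hi) / 2]).1 := lt_of_not_ge h2
          rcases Nat.eq_or_lt_of_le hjge with hje | hj3
          · exact hje ▸ hv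
          · exact lt_of_lt_of_le hv (hp ((lo + hi) / 2) j hmid hj hj3)
      · rw [if_neg h]
        exact ⟨fun j hj hjlo => hlo j hj hjlo, fun j hj hjlo => hhi j hj (by omega)⟩

lemma pvBisect_spec (active : List (Int × List Int)) (v : Int)
    (hp : active.Pairwise (fun p q => p.1 ≤ q.1)) (lo hi : Nat) (hlh : lo ≤ hi)
    (hhle : hi ≤ active.length)
    (hlo : ∀ j (hj : j < active.length), j < lo → (active[j]).1 ≤ v)
    (hhi : ∀ j (hj : j < active.length), hi ≤ j → v < (active[j]).1) :
    (∀ j (hj : j < active.length), j < pvBisect active v lo hi → (active[j]).1 ≤ v) ∧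
      (∀ j (hj : j < active.length), pvBisect active v lo hi ≤ j → v < (active[j]).1) :=
  pvBisectGo_spec active v hp (hi - lo) lo hi (by omega) hlh hhle hlo hhi

lemma pvInsertB_pairwise (a : List (Int × List Int)) (e : Int × List Int)
    (h : a.Pairwise (fun p q => p.1 ≤ q.1)) :
    (pvInsertB a e).Pairwise (fun p q => p.1 ≤ q.1) := by
  obtain ⟨hle, hgt⟩ := pvBisect_spec a e.1 h 0 a.length (by omega)
    le_rfl (fun j hj hjlt => absurd hjlt (by omega)) (fun j hj hjge => absurd hj (by omega))
  have hib := pvBisect_between a e.1 0 a.length (by omega)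
  rw [List.pairwise_iff_getElem] at h ⊢
  unfold pvInsertB
  have hlen : (a.insertIdx (pvBisect a e.1 0 a.length) e).length = a.length + 1 :=
    List.length_insertIdx_of_le_length hib.2 e
  intro p q hp' hq' hpq
  rw [hlen] at hp' hq'
  -- describe the entries of the inserted list
  have hat : ∀ (j : Nat) (hj : j < a.length + 1),
      (a.insertIdx (pvBisect a e.1 0 a.length) e)[j]'(by omega) =
        if hlt : j < pvBisect a e.1 0 a.length then a[j]'(by omega)
        else if j = pvBisect a e.1 0 a.length then e
        else a[j - 1]'(by omega) := by
    intro j hj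
    by_cases h1 : j < pvBisect a e.1 0 a.length
    · rw [dif_pos h1, List.getElem_insertIdx_of_lt h1]
    · rw [dif_neg h1]
      by_cases h2 : j = pvBisect a e.1 0 a.length
      · subst h2
        rw [if_pos rfl, List.getElem_insertIdx_self (by rw [hlen]; omega)]
      · rw [if_neg h2]
        have hj1 : pvBisect a e.1 0 a.length + (j - pvBisect a e.1 0 a.length - 1) + 1 = j := by
          omega
        have hjlt : pvBisect a e.1 0 a.length + (j - pvBisect a e.1 0 a.length - 1) <
            a.length := by omega
        calc (a.insertIdx (pvBisect a e.1 0 a.length) e)[j]'(by omega)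
            = (a.insertIdx (pvBisect a e.1 0 a.length) e)[pvBisect a e.1 0 a.length +
                (j - pvBisect a e.1 0 a.length - 1) + 1]'(by omega) := by
              congr 1
              omega
          _ = a[pvBisect a e.1 0 a.length + (j - pvBisect a e.1 0 a.length - 1)]'hjlt :=
              List.getElem_insertIdx_add_succ a e _ _ hjlt
          _ = a[j - 1]'(by omega) := by
              congr 1
              omega
  rw [hat p (by omega), hat q (by omega)]
  by_cases hq1 : q < pvBisect a e.1 0 a.length
  · rw [dif_pos hq1, dif_pos (by omega)]
    exact h p q (by omega) (by omega) hpq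
  · rw [dif_neg hq1]
    by_cases hq2 : q = pvBisect a e.1 0 a.length
    · rw [if_pos hq2, dif_pos (by omega)]
      exact hle p (by omega) (by omega)
    · rw [if_neg hq2]
      have hq3 : q - 1 < a.length := by omega
      by_cases hp1 : p < pvBisect a e.1 0 a.length
      · rw [dif_pos hp1]
        exact h p (q - 1) (by omega) hq3 (by omega)
      · rw [dif_neg hp1]
        by_cases hp2 : p = pvBisect a e.1 0 a.length
        · rw [if_pos hp2]
          exact le_of_lt (hgt (q - 1) hq3 (by omega))
        · rw [if_neg hp2]
          exact h (p - 1) (q - 1) (by omega) hq3 (by omega)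

lemma pvAdd_pairwise (a : List (Int × List Int)) (r : List Int)
    (h : a.Pairwise (fun p q => p.1 ≤ q.1)) :
    (pvAdd a r).Pairwise (fun p q => p.1 ≤ q.1) := by
  cases r with
  | nil => exact h
  | cons v t => exact pvInsertB_pairwise a (v, t) h

lemma pvFoldlAdd_pairwise (l : List (List Int)) (a : List (Int × List Int))
    (h : a.Pairwise (fun p q => p.1 ≤ q.1)) :
    (l.foldl pvAdd a).Pairwise (fun p q => p.1 ≤ q.1) := by
  induction l generalizing a with
  | nil => exact h
  | cons r rest ih => exact ih _ (pvAdd_pairwise a r h)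

lemma pvFoldlAdd_perm (l : List (List Int)) (a : List (Int × List Int)) :
    ((l.foldl pvAdd a).map pvG).Perm (l.filter pvNE ++ a.map pvG) := by
  induction l generalizing a with
  | nil => simp
  | cons r rest ih =>
      simp only [List.foldl_cons]
      refine (ih (pvAdd a r)).trans ?_
      cases r with
      | nil => simp [pvAdd, pvNE, List.filter_cons]
      | cons v t =>
          have hfil : List.filter pvNE ((v :: t) :: rest) = (v :: t) :: rest.filter pvNE := by
            simp [pvNE, List.filter_cons]
          rw [hfil]
          have hp : ((pvAdd a (v :: t)).map pvG).Perm ((v :: t) :: a.map pvG) := by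
            simpa [pvAdd, pvG] using (pvInsertB_perm a (v, t)).map pvG
          exact (hp.append_left _).trans List.perm_middle

-- counting the minimum among a sorted worklist: it is the equal-head prefix
lemma pvSortedCount (m : Int) (l : List (Int × List Int))
    (hge : ∀ x ∈ l, m ≤ x.1) (hp : l.Pairwise (fun p q => p.1 ≤ q.1)) :
    (l.map Prod.fst).count m = (l.takeWhile (fun x => x.1 == m)).length ∧
      ∀ x ∈ l.dropWhile (fun x => x.1 == m), m < x.1 := by
  induction l with
  | nil => simp
  | cons x t ih =>
      rcases List.pairwise_cons.mp hp with ⟨hx, ht⟩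
      by_cases hxm : x.1 = m
      · have hge' : ∀ y ∈ t, m ≤ y.1 := fun y hy => hge y (List.mem_cons_of_mem _ hy)
        obtain ⟨ihc, ihd⟩ := ih hge' ht
        constructor
        · simp only [List.takeWhile_cons, List.map_cons]
          rw [show (x.1 == m) = true by simpa using hxm]
          simp only [List.length_cons]
          rw [List.count_cons]
          simp [hxm, ihc]
        · intro y hy
          simp only [List.dropWhile_cons] at hy
          rw [show (x.1 == m) = true by simpa using hxm] at hy
          exact ihd y (by simpa using hy)
      · have hlt : m < x.1 := lt_of_le_of_ne (hge x (List.mem_cons_self)) (fun h => hxm h.symm)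
        have hnot : ∀ y ∈ t, y.1 ≠ m := by
          intro y hy h
          have := lt_of_lt_of_le hlt (hx y hy)
          omega
        constructor
        · have : m ∉ (x :: t).map Prod.fst := by
            simp only [List.map_cons, List.mem_cons]
            rintro (h | h)
            · exact hxm h.symm
            · rcases List.mem_map.mp h with ⟨y, hy, hym⟩
              exact hnot y hy hym
          rw [List.count_eq_zero.mpr this]
          simp only [List.takeWhile_cons]
          rw [show (x.1 == m) = false by simpa using hxm]
          simp
        · intro y hy
          simp only [List.dropWhile_cons] at hy
          rw [show (x.1 == m) = false by simpa using hxm] at hy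
          rcases List.mem_cons.mp hy with rfl | hy
          · exact hlt
          · exact lt_of_lt_of_le hlt (hx y hy)

-- popping the minimum keeps only the nonempty results, seen through the nonempty filter
lemma pvFilter_map_pop (m : Int) (rows : List (List Int)) :
    (rows.map (pvPop m)).filter pvNE = ((rows.filter pvNE).map (pvPop m)).filter pvNE := by
  induction rows with
  | nil => rfl
  | cons r rs ih =>
      cases r with
      | nil => simpa [pvPop, pvNE, List.filter_cons] using ih
      | cons a t =>
          simp only [List.map_cons, List.filter_cons, pvNE, List.isEmpty_cons, Bool.not_false,
            if_pos rfl]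
          by_cases h : pvPop m (a :: t) = [] <;>
            simp [pvNE, h, ih, List.isEmpty_iff]

lemma pv_main (n : Nat) : ∀ (active : List (Int × List Int)) (rows : List (List Int)) (acc : List Int),
    pvMeasB active ≤ n →
    active.Pairwise (fun p q => p.1 ≤ q.1) →
    (active.map pvG).Perm (rows.filter pvNE) →
    pvLoopB active acc = pvLoopA rows acc := by
  induction n with
  | zero =>
      intro active rows acc hmeas hsort hperm
      cases active with
      | cons e rest => simp [pvMeasB] at hmeas
      | nil =>
          have hfil : rows.filter pvNE = [] := by simpa using hperm.symm.eq_nil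
          rw [pvLoopB, pvLoopA.eq_def]
          split
          · rfl
          · rename_i m hm
            rw [pvHeads_eq, hfil] at hm
            simp only [List.map_nil] at hm
            exact absurd ((PySem.List.min?_mem hm)) (List.not_mem_nil)
  | succ n ih =>
      intro active rows acc hmeas hsort hperm
      cases active with
      | nil =>
          have hfil : rows.filter pvNE = [] := by simpa using hperm.symm.eq_nil
          rw [pvLoopB, pvLoopA.eq_def]
          split
          · rfl
          · rename_i m hm
            rw [pvHeads_eq, hfil] at hm
            simp only [List.map_nil] at hm
            exact absurd ((PySem.List.min?_mem hm)) (List.not_mem_nil)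
      | cons e rest =>
          rcases List.pairwise_cons.mp hsort with ⟨hx, hrest⟩
          have hgeAll : ∀ x ∈ e :: rest, e.1 ≤ x.1 := by
            intro x hxm
            rcases List.mem_cons.mp hxm with rfl | hxm
            · exact le_rfl
            · exact hx x hxm
          obtain ⟨hcnt, hdw⟩ := pvSortedCount e.1 (e :: rest) hgeAll hsort
          -- abbreviations
          have htw : (e :: rest).takeWhile (fun x => x.1 == e.1) =
              e :: rest.takeWhile (fun x => x.1 == e.1) := by
            rw [List.takeWhile_cons]
            simp
          have hdrop : (e :: rest).dropWhile (fun x => x.1 == e.1) =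
              rest.dropWhile (fun x => x.1 == e.1) := by
            rw [List.dropWhile_cons]
            simp
          rw [htw] at hcnt
          rw [hdrop] at hdw
          -- the heads of the rows, up to permutation, are the worklist values
          have hheads : (pvHeads rows).Perm ((e :: rest).map Prod.fst) := by
            have h1 := (hperm.symm).map (fun r => r.headD 0)
            have h2 : ((e :: rest).map pvG).map (fun r => r.headD 0) =
                (e :: rest).map Prod.fst := by
              simp [pvG, List.map_map, Function.comp]
            rw [pvHeads_eq]
            exact (h1.trans (h2 ▸ List.Perm.refl _)).symm.symm
          -- the scrutinee of A's loop is e.1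
          have hmin : PySem.List.min? (pvHeads rows) (fun x => x) = some e.1 := by
            apply pvMin?_eq
            · exact hheads.mem_iff.mpr (by simp)
            · intro y hy
              have hy' := hheads.mem_iff.mp hy
              rcases List.mem_cons.mp hy' with h | h
              · omega
              · rcases List.mem_map.mp h with ⟨x, hxm, rfl⟩
                exact hx x hxm
          have hcount : (pvHeads rows).count e.1 =
              (rest.takeWhile (fun x => x.1 == e.1)).length + 1 := by
            rw [hheads.count_eq, hcnt]
            simp
          -- unfold one step of A
          rw [pvLoopA.eq_def]
          split
          · rename_i h
            rw [hmin] at h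
            simp at h
          rename_i m' hm'
          rw [hmin] at hm'
          injection hm' with hm'
          subst hm'
          -- unfold one step of B
          rw [pvLoopB]
          -- both steps append to acc under the same condition
          have hiff : ((e :: rest.takeWhile (fun x => x.1 == e.1)).length = 1) ↔
              ((pvHeads rows).count e.1 = 1) := by
            rw [hcount]
            simp
          rw [if_congr hiff rfl rfl]
          -- set up the recursive call
          have hdec := pvLoopB_dec e rest
          have hsort' : ((e :: rest.takeWhile (fun x => x.1 == e.1)).foldl
              (fun a x => pvAdd a x.2) (rest.dropWhile (fun x => x.1 == e.1))).Pairwise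
                (fun p q => p.1 ≤ q.1) := by
            rw [← List.foldl_map]
            exact pvFoldlAdd_pairwise _ _
              (List.Pairwise.sublist (List.dropWhile_sublist _) hrest)
          apply ih _ _ _ (by omega) hsort'
          -- the invariant permutation for the new states
          have hsplit : e :: rest = (e :: rest.takeWhile (fun x => x.1 == e.1)) ++
              rest.dropWhile (fun x => x.1 == e.1) := by
            rw [List.cons_append, List.takeWhile_append_dropWhile]
          have hmapped : (e :: rest).map (fun x => pvPop e.1 (pvG x)) =
              (e :: rest.takeWhile (fun x => x.1 == e.1)).map Prod.snd ++
                (rest.dropWhile (fun x => x.1 == e.1)).map pvG := by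
            rw [hsplit, List.map_append]
            congr 1
            · apply List.map_congr_left
              intro x hxm
              have hx1 : x.1 = e.1 := by
                rcases List.mem_cons.mp hxm with rfl | hxm
                · rfl
                · simpa using List.mem_takeWhile_imp hxm
              simp [pvG, pvPop, hx1]
            · apply List.map_congr_left
              intro x hxm
              have hx1 : e.1 < x.1 := hdw x hxm
              simp only [pvG, pvPop]
              rw [if_neg (by omega)]
          have htarget : ((rows.map (pvPop e.1)).filter pvNE).Perm
              (((e :: rest.takeWhile (fun x => x.1 == e.1)).map Prod.snd).filter pvNE ++
                (rest.dropWhile (fun x => x.1 == e.1)).map pvG) := by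
            rw [pvFilter_map_pop]
            have hstep : ((rows.filter pvNE).map (pvPop e.1)).Perm
                (((e :: rest).map pvG).map (pvPop e.1)) := (hperm.symm).map _
            refine (hstep.filter pvNE).trans ?_
            rw [List.map_map]
            have : (e :: rest).map (pvPop e.1 ∘ pvG) =
                (e :: rest).map (fun x => pvPop e.1 (pvG x)) := rfl
            rw [this, hmapped, List.filter_append]
            have hfg : ((rest.dropWhile (fun x => x.1 == e.1)).map pvG).filter pvNE =
                (rest.dropWhile (fun x => x.1 == e.1)).map pvG := by
              apply List.filter_eq_self.mpr
              intro r hr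
              rcases List.mem_map.mp hr with ⟨x, _, rfl⟩
              rfl
            rw [hfg]
          refine ((?_ : ((_ : List (Int × List Int)).map pvG).Perm _).trans htarget.symm)
          rw [← List.foldl_map]
          refine (pvFoldlAdd_perm _ _).trans ?_
          have : ((e :: rest.takeWhile (fun x => x.1 == e.1)).map Prod.snd).filter pvNE =
              ((e :: rest.takeWhile (fun x => x.1 == e.1)).map Prod.snd).filter pvNE := rfl
          exact List.Perm.refl _

-- ===== VERDICT (by name: the statement is the Claim_ definition above) =====
theorem Zadanie_97_spec : Claim_equal_Zadanie_97 := by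
  intro T1 _
  unfold Spec_Zadanie_97 Zadanie_97 Zadanie_97_alt
  have hsort : (T1.foldl pvAdd []).Pairwise (fun p q => p.1 ≤ q.1) :=
    pvFoldlAdd_pairwise T1 [] (by simp)
  have hperm : ((T1.foldl pvAdd []).map pvG).Perm (T1.filter pvNE) := by
    simpa using pvFoldlAdd_perm T1 []
  have h := pv_main (pvMeasB (T1.foldl pvAdd [])) (T1.foldl pvAdd []) T1 [] le_rfl hsort hperm
  simp only [h]
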